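-- pv_equiv track=rewrite | github.com/yourbteam/memory-knowledge | src/memory_knowledge/admin/analytics.py | _distinct_sorted
-- ===== SOURCE A (Python) =====
-- def _distinct_sorted(items: list[dict[str, str]], key_name: str) -> list[dict[str, str]]:
--     seen: set[str] = set()
--     result: list[dict[str, str]] = []
--     for item in sorted(items, key=lambda x: x[key_name]):
--         if item[key_name] in seen:
--             continue
--         seen.add(item[key_name])
--         result.append(item)
--     return result
-- ===== SOURCE B (Python) =====
-- def _distinct_sorted(items: list[dict[str, str]], key_name: str) -> list[dict[str, str]]:
--     by_key: dict[str, dict[str, str]] = {}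
--     for item in items:
--         k = item[key_name]
--         if k not in by_key:
--             by_key[k] = item
--     return sorted(by_key.values(), key=lambda x: x[key_name])
-- ===== Notes on version B (the rewrite author's own statement) =====
-- stated objective: simpler
-- what changed: B dedups first (a dict keyed by item[key_name], keeping the first occurrence in original order) and sorts the deduplicated values afterwards, instead of A's sort-everything-then-scan-with-a-seen-set; stability of Python's sort makes the two phase orders agree.
import Mathlib
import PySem

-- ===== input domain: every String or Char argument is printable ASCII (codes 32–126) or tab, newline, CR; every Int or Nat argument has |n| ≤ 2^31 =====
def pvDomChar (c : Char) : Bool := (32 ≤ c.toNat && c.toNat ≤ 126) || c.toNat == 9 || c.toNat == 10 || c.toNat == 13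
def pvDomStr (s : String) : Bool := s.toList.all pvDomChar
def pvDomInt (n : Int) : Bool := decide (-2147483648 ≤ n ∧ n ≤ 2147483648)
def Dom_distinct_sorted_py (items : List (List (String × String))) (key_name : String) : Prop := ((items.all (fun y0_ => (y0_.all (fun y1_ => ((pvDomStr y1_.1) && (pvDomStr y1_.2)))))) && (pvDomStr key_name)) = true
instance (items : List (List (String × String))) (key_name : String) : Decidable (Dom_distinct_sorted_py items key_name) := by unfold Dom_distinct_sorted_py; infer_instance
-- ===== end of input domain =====

-- B dedups first (dict keyed by item[key_name], keeping the first occurrence in original order) and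
-- sorts the deduplicated values afterwards, instead of A's sort-then-scan-with-a-seen-set; stability
-- of the sort makes the two phase orders agree (objective: simpler).


-- ===== PORT A =====
-- item[key_name] on the association-list dict: first match; total form, exact under Pre_ (key present)
def pvKeyOf (item : List (String × String)) (kn : String) : String :=
  ((item.find? (fun p => p.1 == kn)).map (·.2)).getD ""

def distinct_sorted_py (items : List (List (String × String))) (key_name : String) : List (List (String × String)) :=
  ((PySem.List.sorted items (fun x => pvKeyOf x key_name) false).foldl
      (fun (st : PySem.Set String × List (List (String × String))) item =>
        if pvKeyOf item key_name ∈ st.1 then st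
        else (PySem.Set.add st.1 (pvKeyOf item key_name), st.2 ++ [item]))
      (PySem.Set.empty, [])).2

-- ===== PORT B =====
def distinct_sorted_py_alt (items : List (List (String × String))) (key_name : String) : List (List (String × String)) :=
  let by_key : PySem.Dict String (List (String × String)) :=
    items.foldl
      (fun d item =>
        let k := pvKeyOf item key_name
        if d.contains k then d else d.insert k item)
      PySem.Dict.empty
  PySem.List.sorted by_key.values (fun x => pvKeyOf x key_name) false

-- ===== PRECONDITION & SPEC =====
-- Pre_ excludes exactly the inputs where Python's item[key_name] raises KeyError: some item lacks key_name.
def Pre_distinct_sorted_py (items : List (List (String × String))) (key_name : String) : Prop :=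
  ∀ item ∈ items, key_name ∈ item.map Prod.fst
instance (items : List (List (String × String))) (key_name : String) : Decidable (Pre_distinct_sorted_py items key_name) := by unfold Pre_distinct_sorted_py; infer_instance

def pvWitness_distinct_sorted_py : (List (List (String × String))) × String :=
  ([[("k", "a"), ("v", "1")], [("k", "b")], [("k", "a"), ("v", "2")]], "k")

def Spec_distinct_sorted_py (items : List (List (String × String))) (key_name : String) (out : List (List (String × String))) : Prop := out = distinct_sorted_py_alt items key_name
instance (items : List (List (String × String))) (key_name : String) (out : List (List (String × String))) : Decidable (Spec_distinct_sorted_py items key_name out) := by unfold Spec_distinct_sorted_py; infer_instance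

-- ===== CLAIM (what is proved, stated in full; the proofs are below) =====
def Claim_equal_distinct_sorted_py : Prop := ∀ (items : List (List (String × String))) (key_name : String), Dom_distinct_sorted_py items key_name → Pre_distinct_sorted_py items key_name → Spec_distinct_sorted_py items key_name (distinct_sorted_py items key_name)

-- ===== LEMMAS AND PROOFS =====

-- first-occurrence-per-key dedup with an explicit seen list (proof skeleton shared by both ports)
def pvDedup (kn : String) : List (List (String × String)) → List String → List (List (String × String))
  | [], _ => []
  | x :: xs, seen =>
    if pvKeyOf x kn ∈ seen then pvDedup kn xs seen
    else x :: pvDedup kn xs (seen ++ [pvKeyOf x kn])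

lemma pvBridgeA (kn : String) : ∀ (ys : List (List (String × String))) (seen : List String) (acc : List (List (String × String))),
    (ys.foldl
      (fun (st : PySem.Set String × List (List (String × String))) item =>
        if pvKeyOf item kn ∈ st.1 then st
        else (PySem.Set.add st.1 (pvKeyOf item kn), st.2 ++ [item]))
      (seen, acc)).2 = acc ++ pvDedup kn ys seen := by
  intro ys
  induction ys with
  | nil => intro seen acc; simp [pvDedup]
  | cons x t ih =>
    intro seen acc
    by_cases h : pvKeyOf x kn ∈ seen
    · simp [pvDedup, h, ih]
    · simp [pvDedup, h, ih]

lemma pvBridgeB (kn : String) : ∀ (ys : List (List (String × String))) (d : PySem.Dict String (List (String × String))),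
    d.keys.Nodup →
    (ys.foldl
      (fun d item =>
        let k := pvKeyOf item kn
        if d.contains k then d else d.insert k item) d).values
      = d.values ++ pvDedup kn ys d.keys := by
  intro ys
  induction ys with
  | nil => intro d hd; simp [pvDedup]
  | cons x t ih =>
    intro d hd
    by_cases h : pvKeyOf x kn ∈ d.keys
    · have hc : d.contains (pvKeyOf x kn) = true := by
        rw [PySem.Dict.contains_eq_decide_mem_keys]; simp [h]
      simp [pvDedup, h, hc, ih d hd]
    · have hc : d.contains (pvKeyOf x kn) = false := by
        rw [PySem.Dict.contains_eq_decide_mem_keys]; simp [h]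
      have hkeys : (d.insert (pvKeyOf x kn) x).keys = d.keys ++ [pvKeyOf x kn] :=
        PySem.Dict.keys_insert_of_not_contains d x hc
      have hvals : (d.insert (pvKeyOf x kn) x).values = d.values ++ [x] := by
        simp [PySem.Dict.values, PySem.Dict.items_insert_of_not_contains d x hc]
      have hnd : (d.insert (pvKeyOf x kn) x).keys.Nodup := by
        rw [hkeys]; simp [List.nodup_append, hd]
        intro a ha heq
        exact h (heq ▸ ha)
      have := ih (d.insert (pvKeyOf x kn) x) hnd
      rw [hkeys, hvals] at this
      simp [pvDedup, h, hc, this]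

lemma pvInsertBy_filter_ne {α : Type} (key : α → String) (x : α) (k : String) (h : key x ≠ k) (ys : List α) :
    (PySem.List.insertBy (fun a b => decide (key a < key b)) x ys).filter (fun a => key a == k)
      = ys.filter (fun a => key a == k) := by
  induction ys with
  | nil => simp [PySem.List.insertBy, h]
  | cons y t ih =>
    rw [PySem.List.insertBy]
    by_cases hb : key x < key y
    · simp [hb, List.filter_cons, h]
    · simp only [hb, decide_false, Bool.false_eq_true, if_false, List.filter_cons]
      rw [ih]

lemma pvInsertBy_filter_eq {α : Type} (key : α → String) (x : α) (ys : List α)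
    (hp : ys.Pairwise (fun a b => key a ≤ key b)) :
    (PySem.List.insertBy (fun a b => decide (key a < key b)) x ys).filter (fun a => key a == key x)
      = ys.filter (fun a => key a == key x) ++ [x] := by
  induction ys with
  | nil => simp [PySem.List.insertBy]
  | cons y t ih =>
    rw [List.pairwise_cons] at hp
    obtain ⟨hy, hp'⟩ := hp
    rw [PySem.List.insertBy]
    by_cases hb : key x < key y
    · have hnil : (y :: t).filter (fun a => key a == key x) = [] := by
        rw [List.filter_eq_nil_iff]
        intro z hz
        have hlt : key x < key z := by
          rcases List.mem_cons.mp hz with hz | hz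
          · rw [hz]; exact hb
          · exact lt_of_lt_of_le hb (hy z hz)
        simp [(ne_of_lt hlt).symm]
      simp only [hb, decide_true, if_true]
      rw [List.filter_cons, List.filter_cons] at *
      simp only [beq_self_eq_true, if_true]
      rw [hnil]
      have hnil2 : t.filter (fun a => key a == key x) = [] := by
        rw [List.filter_eq_nil_iff]
        intro z hz
        have hlt : key x < key z := lt_of_lt_of_le hb (hy z hz)
        simp [(ne_of_lt hlt).symm]
      have hy' : ¬ (key y == key x) = true := by
        simp [(ne_of_lt hb).symm]
      simp
    · simp only [hb, decide_false, Bool.false_eq_true, if_false, List.filter_cons]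
      rw [ih hp']
      split <;> simp

-- stability of the sort: each key class keeps its original order
lemma pvSorted_filter {α : Type} (key : α → String) (k : String) (ys : List α) :
    (PySem.List.sorted ys key false).filter (fun a => key a == k) = ys.filter (fun a => key a == k) := by
  induction ys using List.reverseRecOn with
  | nil => simp [PySem.List.sorted]
  | append_singleton ys x ih =>
    have hs : PySem.List.sorted (ys ++ [x]) key false
        = PySem.List.insertBy (fun a b => decide (key a < key b)) x (PySem.List.sorted ys key false) := by
      simp [PySem.List.sorted, List.foldl_append]
    rw [hs]
    by_cases hk : key x = k
    · subst hk
      rw [pvInsertBy_filter_eq key x _ (PySem.List.sorted_pairwise ys key), ih, List.filter_append]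
      simp
    · rw [pvInsertBy_filter_ne key x k hk, ih, List.filter_append]
      simp [hk]

lemma pvDedup_sublist (kn : String) : ∀ (ys : List (List (String × String))) (seen : List String),
    List.Sublist (pvDedup kn ys seen) ys := by
  intro ys
  induction ys with
  | nil => intro seen; simp [pvDedup]
  | cons x t ih =>
    intro seen
    rw [pvDedup]
    split
    · exact (ih seen).cons x
    · exact (ih (seen ++ [pvKeyOf x kn])).cons₂ x

lemma pvDedup_key_not_mem (kn : String) : ∀ (ys : List (List (String × String))) (seen : List String)
    (x : List (String × String)), x ∈ pvDedup kn ys seen → pvKeyOf x kn ∉ seen := by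
  intro ys
  induction ys with
  | nil => intro seen x hx; simp [pvDedup] at hx
  | cons y t ih =>
    intro seen x hx
    rw [pvDedup] at hx
    split at hx
    · exact ih seen x hx
    · rcases List.mem_cons.mp hx with h | h
      · subst h; assumption
      · intro hmem
        exact ih _ x h (List.mem_append_left _ hmem)

lemma pvDedup_pairwise_ne (kn : String) : ∀ (ys : List (List (String × String))) (seen : List String),
    (pvDedup kn ys seen).Pairwise (fun a b => pvKeyOf a kn ≠ pvKeyOf b kn) := by
  intro ys
  induction ys with
  | nil => intro seen; simp [pvDedup]
  | cons x t ih =>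
    intro seen
    rw [pvDedup]
    split
    · exact ih seen
    · refine List.Pairwise.cons ?_ (ih _)
      intro b hb heq
      exact pvDedup_key_not_mem kn t _ b hb (List.mem_append_right _ (by simp [heq]))

lemma pvDedup_mem_iff (kn : String) : ∀ (ys : List (List (String × String))) (seen : List String)
    (x : List (String × String)),
    x ∈ pvDedup kn ys seen ↔ pvKeyOf x kn ∉ seen ∧
      (ys.filter (fun a => pvKeyOf a kn == pvKeyOf x kn)).head? = some x := by
  intro ys
  induction ys with
  | nil => intro seen x; simp [pvDedup]
  | cons y t ih =>
    intro seen x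
    rw [pvDedup]
    by_cases hk : pvKeyOf y kn = pvKeyOf x kn
    · have hfil : (y :: t).filter (fun a => pvKeyOf a kn == pvKeyOf x kn)
          = y :: t.filter (fun a => pvKeyOf a kn == pvKeyOf x kn) := by
        simp [hk]
      rw [hfil, hk]
      by_cases hy : pvKeyOf x kn ∈ seen
      · rw [if_pos hy]
        constructor
        · intro hx; exact absurd hy ((ih seen x).mp hx).1
        · rintro ⟨hns, -⟩; exact absurd hy hns
      · rw [if_neg hy]
        constructor
        · intro hx
          rcases List.mem_cons.mp hx with h | h
          · subst h; exact ⟨hy, by simp⟩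
          · have hnm := pvDedup_key_not_mem kn t _ x h
            exact absurd (List.mem_append_right _ (by simp)) hnm
        · rintro ⟨hns, hhead⟩
          have hxy : y = x := by simpa using hhead
          rw [← hxy]
          exact List.mem_cons_self ..
    · have hfil : (y :: t).filter (fun a => pvKeyOf a kn == pvKeyOf x kn)
          = t.filter (fun a => pvKeyOf a kn == pvKeyOf x kn) := by
        simp [hk]
      rw [hfil]
      by_cases hy : pvKeyOf y kn ∈ seen
      · rw [if_pos hy]; exact ih seen x
      · rw [if_neg hy]
        constructor
        · intro hx
          rcases List.mem_cons.mp hx with h | h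
          · have : pvKeyOf y kn = pvKeyOf x kn := by rw [h]
            exact absurd this hk
          · obtain ⟨hns, hhead⟩ := (ih _ x).mp h
            exact ⟨fun hm => hns (List.mem_append_left _ hm), hhead⟩
        · rintro ⟨hns, hhead⟩
          refine List.mem_cons.mpr (Or.inr ((ih _ x).mpr ⟨?_, hhead⟩))
          intro hm
          rcases List.mem_append.mp hm with hm | hm
          · exact hns hm
          · simp at hm; exact hk hm.symm


-- dedup-then-sort = sort-then-dedup, for a stable sort
lemma pvMain (kn : String) (ys : List (List (String × String))) :
    pvDedup kn (PySem.List.sorted ys (fun x => pvKeyOf x kn) false) []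
      = PySem.List.sorted (pvDedup kn ys []) (fun x => pvKeyOf x kn) false := by
  have hpne := pvDedup_pairwise_ne kn (PySem.List.sorted ys (fun x => pvKeyOf x kn) false) []
  have hsub := pvDedup_sublist kn (PySem.List.sorted ys (fun x => pvKeyOf x kn) false) []
  have hle : (pvDedup kn (PySem.List.sorted ys (fun x => pvKeyOf x kn) false) []).Pairwise
      (fun a b => pvKeyOf a kn ≤ pvKeyOf b kn) :=
    List.Pairwise.sublist hsub (PySem.List.sorted_pairwise ys (fun x => pvKeyOf x kn))
  have hlt : (pvDedup kn (PySem.List.sorted ys (fun x => pvKeyOf x kn) false) []).Pairwise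
      (fun a b => pvKeyOf a kn < pvKeyOf b kn) :=
    (hle.and hpne).imp (fun h => lt_of_le_of_ne h.1 h.2)
  have hnd1 : (pvDedup kn (PySem.List.sorted ys (fun x => pvKeyOf x kn) false) []).Nodup :=
    hpne.imp (fun h heq => h (congrArg (fun z => pvKeyOf z kn) heq))
  have hnd2 : (pvDedup kn ys []).Nodup :=
    (pvDedup_pairwise_ne kn ys []).imp (fun h heq => h (congrArg (fun z => pvKeyOf z kn) heq))
  have hperm : (pvDedup kn (PySem.List.sorted ys (fun x => pvKeyOf x kn) false) []).Perm (pvDedup kn ys []) := by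
    rw [List.perm_ext_iff_of_nodup hnd1 hnd2]
    intro a
    rw [pvDedup_mem_iff, pvDedup_mem_iff, pvSorted_filter]
  symm
  apply PySem.List.sorted_eq_of_perm_of_pairwise_lt
  · exact hperm
  · exact hlt

-- ===== VERDICT (by name: the statement is the Claim_ definition above) =====
theorem distinct_sorted_py_spec : Claim_equal_distinct_sorted_py := by
  intro items kn _ _
  unfold Spec_distinct_sorted_py
  simp only [distinct_sorted_py, distinct_sorted_py_alt]
  rw [pvBridgeA, pvBridgeB kn items PySem.Dict.empty (by simp)]
  simpa using pvMain kn items
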